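-- pv_equiv track=rewrite | github.com/Akuearias/LeetCode | maxCount.py | maxCount
-- ===== SOURCE A (Python) =====
-- from typing import List
--
-- def maxCount(banned: List[int], n: int, maxSum: int) -> int:
--     banned_set = set(banned)
--     S = 0
--     T = 0
--     for i in range(1, n + 1):
--         if i not in banned_set and T + i <= maxSum:
--             T += i
--             S += 1
--         if T > maxSum:
--             break
--     return S
-- ===== SOURCE B (Python) =====
-- def _take(lo, length, budget):
--     # largest k in [0, length] with k*lo + k*(k-1)//2 <= budget, by binary search
--     a, z = 0, length
--     while a < z:
--         m = (a + z + 1) // 2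
--         if m * lo + m * (m - 1) // 2 <= budget:
--             a = m
--         else:
--             z = m - 1
--     return a
--
-- def maxCount(banned, n, maxSum):
--     blocked = sorted({b for b in banned if 1 <= b <= n})
--     total = 0
--     prev = 0
--     budget = maxSum
--     for b in blocked + [n + 1]:
--         lo = prev + 1
--         hi = b - 1
--         if lo <= hi:
--             k = _take(lo, hi - lo + 1, budget)
--             total += k
--             budget -= k * lo + k * (k - 1) // 2
--             if k < hi - lo + 1:
--                 return total
--         prev = b
--     return total
-- ===== Notes on version B (the rewrite author's own statement) =====
-- stated objective: faster
-- what changed: Instead of scanning every integer 1..n, B sorts the distinct in-range banned values and, for each gap of consecutive allowed integers, binary-searches the largest count whose arithmetic-series sum fits the remaining budget.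
import Mathlib
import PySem

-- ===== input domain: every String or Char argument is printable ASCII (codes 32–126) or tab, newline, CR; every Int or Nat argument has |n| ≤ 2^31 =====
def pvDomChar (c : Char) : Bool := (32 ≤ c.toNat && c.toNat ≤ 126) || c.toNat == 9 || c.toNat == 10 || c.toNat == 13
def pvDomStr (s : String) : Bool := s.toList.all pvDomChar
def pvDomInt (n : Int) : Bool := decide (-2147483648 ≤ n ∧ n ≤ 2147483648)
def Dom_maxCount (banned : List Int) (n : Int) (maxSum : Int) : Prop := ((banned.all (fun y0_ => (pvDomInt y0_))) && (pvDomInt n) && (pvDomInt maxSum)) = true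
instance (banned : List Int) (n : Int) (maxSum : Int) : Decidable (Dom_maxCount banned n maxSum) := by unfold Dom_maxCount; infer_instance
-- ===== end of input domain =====

-- B replaces A's scan of every integer 1..n by sorted banned values + per-gap binary search (measured faster on large n).

-- ===== PORT A =====
-- the for-loop with break: recursion over the range list carrying (S, T)
def maxCountLoop (bset : PySem.Set Int) (maxSum : Int) : List Int → Int → Int → Int
  | [], S, _T => S
  | i :: rest, S, T =>
    let S' := if i ∉ bset ∧ T + i ≤ maxSum then S + 1 else S
    let T' := if i ∉ bset ∧ T + i ≤ maxSum then T + i else T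
    if T' > maxSum then S' else maxCountLoop bset maxSum rest S' T'

def maxCount (banned : List Int) (n : Int) (maxSum : Int) : Int :=
  maxCountLoop (PySem.Set.ofList banned) maxSum (PySem.List.pyRange 1 (n + 1) 1) 0 0

-- ===== PORT B =====
-- _take: binary search for the largest k in [a, z] with k*lo + k*(k-1)//2 <= budget
def takeB (lo budget : Int) (a z : Int) : Int :=
  if h : a < z then
    let m := PySem.Int.floordiv (a + z + 1) 2
    if m * lo + PySem.Int.floordiv (m * (m - 1)) 2 ≤ budget then
      takeB lo budget m z
    else
      takeB lo budget a (m - 1)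
  else a
termination_by (z - a).toNat
decreasing_by
  · have h1 := PySem.Int.floordiv_two_mid_bounds (lo := a + 1) (hi := z) (by omega)
    have h2 : a + 1 + z = a + z + 1 := by ring
    rw [h2] at h1
    simp only [m] at *; omega
  · have h1 := PySem.Int.floordiv_two_mid_bounds (lo := a + 1) (hi := z) (by omega)
    have h2 : a + 1 + z = a + z + 1 := by ring
    rw [h2] at h1
    simp only [m] at *; omega

-- the for-loop over blocked + [n+1] with early return
def segLoopB : List Int → Int → Int → Int → Int
  | [], _prev, total, _budget => total
  | b :: rest, prev, total, budget =>
    let lo := prev + 1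
    let hi := b - 1
    if lo ≤ hi then
      let k := takeB lo budget 0 (hi - lo + 1)
      let total' := total + k
      let budget' := budget - (k * lo + PySem.Int.floordiv (k * (k - 1)) 2)
      if k < hi - lo + 1 then total'
      else segLoopB rest b total' budget'
    else segLoopB rest b total budget

def maxCount_alt (banned : List Int) (n : Int) (maxSum : Int) : Int :=
  let blocked := PySem.List.sorted
    (PySem.Set.ofList (banned.filter (fun b => decide (1 ≤ b) && decide (b ≤ n))))
    (fun x => x) false
  segLoopB (blocked ++ [n + 1]) 0 0 maxSum

-- ===== PRECONDITION & SPEC =====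
def Spec_maxCount (banned : List Int) (n : Int) (maxSum : Int) (out : Int) : Prop := out = maxCount_alt banned n maxSum
instance (banned : List Int) (n : Int) (maxSum : Int) (out : Int) : Decidable (Spec_maxCount banned n maxSum out) := by unfold Spec_maxCount; infer_instance

-- ===== CLAIM (what is proved, stated in full; the proofs are below) =====
def Claim_equal_maxCount : Prop := ∀ (banned : List Int) (n : Int) (maxSum : Int), Dom_maxCount banned n maxSum → Spec_maxCount banned n maxSum (maxCount banned n maxSum)

-- ===== LEMMAS AND PROOFS =====

-- the break-free body of A's loop, as a fold step
def stepF (bset : PySem.Set Int) (maxSum : Int) (st : Int × Int) (i : Int) : Int × Int :=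
  if i ∉ bset ∧ st.2 + i ≤ maxSum then (st.1 + 1, st.2 + i) else st

-- sum of k consecutive integers starting at lo, as B computes it
def gsum (lo k : Int) : Int := k * lo + PySem.Int.floordiv (k * (k - 1)) 2

theorem gsum_two (lo k : Int) : 2 * gsum lo k = 2 * k * lo + k * (k - 1) := by
  have he : Even ((k - 1) * ((k - 1) + 1)) := Int.even_mul_succ_self (k - 1)
  obtain ⟨j, hj⟩ : ∃ j, k * (k - 1) = j + j := ⟨he.choose, by have := he.choose_spec; linarith [he.choose_spec]; ⟩
  unfold gsum
  rw [PySem.Int.floordiv_eq_ediv_of_pos (by norm_num), hj]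
  have hdiv : (j + j) / 2 = j := by omega
  rw [hdiv]; ring

theorem gsum_zero (lo : Int) : gsum lo 0 = 0 := by
  have := gsum_two lo 0; omega

theorem gsum_one (lo : Int) : gsum lo 1 = lo := by
  have h : 2 * gsum lo 1 = 2 * lo := by linear_combination gsum_two lo 1
  omega

theorem gsum_step (lo k : Int) : gsum lo (k + 1) = gsum lo k + lo + k := by
  have h : 2 * gsum lo (k + 1) = 2 * gsum lo k + 2 * lo + 2 * k := by
    linear_combination gsum_two lo (k + 1) - gsum_two lo k
  omega

theorem gsum_shift (lo k : Int) : gsum lo (k + 1) = lo + gsum (lo + 1) k := by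
  have h : 2 * gsum lo (k + 1) = 2 * lo + 2 * gsum (lo + 1) k := by
    linear_combination gsum_two lo (k + 1) - gsum_two (lo + 1) k
  omega

theorem gsum_mono (lo k k' : Int) (hlo : 1 ≤ lo) (h0 : 0 ≤ k') (h : k' ≤ k) :
    gsum lo k' ≤ gsum lo k := by
  have h1 := gsum_two lo k
  have h2 := gsum_two lo k'
  nlinarith [mul_nonneg (sub_nonneg.2 h) (show (0:Int) ≤ 2 * lo + k + k' - 1 by omega)]

theorem takeB_spec (lo budget : Int) : ∀ (N : Nat) (a z : Int), (z - a).toNat ≤ N → a ≤ z →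
    a ≤ takeB lo budget a z ∧ takeB lo budget a z ≤ z ∧
    (a < takeB lo budget a z → gsum lo (takeB lo budget a z) ≤ budget) ∧
    (takeB lo budget a z < z → ¬ gsum lo (takeB lo budget a z + 1) ≤ budget) := by
  intro N
  induction N with
  | zero =>
    intro a z hle haz
    have hez : a = z := by omega
    rw [takeB]
    simp [hez]
  | succ N ih =>
    intro a z hle haz
    rw [takeB]
    by_cases hlt : a < z
    · simp only [dif_pos hlt]
      have hmid := PySem.Int.floordiv_two_mid_bounds (lo := a + 1) (hi := z) (by omega)
      have h2 : a + 1 + z = a + z + 1 := by ring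
      rw [h2] at hmid
      set m := PySem.Int.floordiv (a + z + 1) 2 with hm
      have hgm : m * lo + PySem.Int.floordiv (m * (m - 1)) 2 = gsum lo m := by
        unfold gsum; ring_nf
      by_cases hp : m * lo + PySem.Int.floordiv (m * (m - 1)) 2 ≤ budget
      · simp only [if_pos hp]
        have hrec := ih m z (by omega) (by omega)
        refine ⟨by omega, hrec.2.1, ?_, hrec.2.2.2⟩
        intro _
        rcases eq_or_lt_of_le hrec.1 with heq | hlt2
        · rw [← heq, ← hgm]; exact hp
        · exact hrec.2.2.1 hlt2
      · simp only [if_neg hp]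
        have hrec := ih a (m - 1) (by omega) (by omega)
        refine ⟨hrec.1, by omega, hrec.2.2.1, ?_⟩
        intro _
        rcases eq_or_lt_of_le hrec.2.1 with heq | hlt2
        · rw [heq]
          have : m - 1 + 1 = m := by ring
          rw [this, ← hgm]; exact hp
        · exact hrec.2.2.2 hlt2
    · simp [dif_neg hlt]
      omega

theorem takeB_rec (lo budget len : Int) (hlo : 1 ≤ lo) (hlen : 0 ≤ len) :
    takeB lo budget 0 len =
      if 1 ≤ len ∧ lo ≤ budget then 1 + takeB (lo + 1) (budget - lo) 0 (len - 1) else 0 := by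
  have hK := takeB_spec lo budget (len - 0).toNat 0 len (by omega) (by omega)
  set K := takeB lo budget 0 len with hKdef
  split_ifs with hc
  · obtain ⟨hc1, hc2⟩ := hc
    have hK' := takeB_spec (lo + 1) (budget - lo) (len - 1 - 0).toNat 0 (len - 1) (by omega) (by omega)
    set K' := takeB (lo + 1) (budget - lo) 0 (len - 1) with hK'def
    -- K ≥ K' + 1
    have hge : K' + 1 ≤ K := by
      by_contra hcon
      push Not at hcon
      have hKlt : K < len := by omega
      have hnot := hK.2.2.2 hKlt
      apply hnot
      rw [show K + 1 = K + 1 from rfl, gsum_shift lo K]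
      rcases eq_or_lt_of_le hK'.1 with heq | hpos
      · -- K' = 0, hence K = 0
        have hK0 : K = 0 := by omega
        rw [hK0, gsum_zero]
        omega
      · have h1 : gsum (lo + 1) K' ≤ budget - lo := hK'.2.2.1 hpos
        have h2 : gsum (lo + 1) K ≤ gsum (lo + 1) K' :=
          gsum_mono (lo + 1) K' K (by omega) hK.1 (by omega)
        omega
    -- K ≤ K' + 1
    have hle : K ≤ K' + 1 := by
      by_contra hcon
      push Not at hcon
      have hKpos : 0 < K := by omega
      have hgK : gsum lo K ≤ budget := hK.2.2.1 hKpos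
      have hsh : gsum lo K = lo + gsum (lo + 1) (K - 1) := by
        have := gsum_shift lo (K - 1)
        have hKs : K - 1 + 1 = K := by ring
        rw [hKs] at this
        exact this
      have hK'lt : K' < len - 1 := by omega
      have hnot := hK'.2.2.2 hK'lt
      apply hnot
      have h2 : gsum (lo + 1) (K' + 1) ≤ gsum (lo + 1) (K - 1) :=
        gsum_mono (lo + 1) (K - 1) (K' + 1) (by omega) (by omega) (by omega)
      omega
    omega
  · push Not at hc
    by_cases hlen : 1 ≤ len
    · have hgt : budget < lo := hc hlen
      by_contra hne
      have hKpos : 0 < K := by omega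
      have hgK : gsum lo K ≤ budget := hK.2.2.1 hKpos
      have h1 : gsum lo 1 ≤ gsum lo K := gsum_mono lo K 1 hlo (by omega) (by omega)
      rw [gsum_one] at h1
      omega
    · omega

theorem fold_stall (bset : PySem.Set Int) (maxSum : Int) :
    ∀ (xs : List Int) (S T : Int), (∀ x ∈ xs, maxSum < T + x) →
    xs.foldl (stepF bset maxSum) (S, T) = (S, T) := by
  intro xs
  induction xs with
  | nil => intro S T _; rfl
  | cons x rest ih =>
    intro S T h
    have hx := h x (by simp)
    simp only [List.foldl_cons, stepF]
    rw [if_neg (by simp; intro _; omega)]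
    exact ih S T (fun y hy => h y (by simp [hy]))

theorem loopA_eq_fold (bset : PySem.Set Int) (maxSum : Int) :
    ∀ (xs : List Int) (S T : Int), T ≤ maxSum →
    maxCountLoop bset maxSum xs S T = (xs.foldl (stepF bset maxSum) (S, T)).1 := by
  intro xs
  induction xs with
  | nil => intro S T _; rfl
  | cons i rest ih =>
    intro S T hT
    by_cases hc : i ∉ bset ∧ T + i ≤ maxSum
    · simp only [maxCountLoop, List.foldl_cons, stepF, if_pos hc]
      rw [if_neg (by omega)]
      exact ih (S + 1) (T + i) hc.2
    · simp only [maxCountLoop, List.foldl_cons, stepF, if_neg hc]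
      rw [if_neg (by omega)]
      exact ih S T hT

theorem loopA_stall (bset : PySem.Set Int) (maxSum : Int) (xs : List Int) (S T : Int)
    (hT : maxSum < T) (h : ∀ x ∈ xs, maxSum < T + x) :
    maxCountLoop bset maxSum xs S T = S := by
  cases xs with
  | nil => rfl
  | cons x rest =>
    have hx := h x (by simp)
    have hc : ¬(x ∉ bset ∧ T + x ≤ maxSum) := by rintro ⟨_, h2⟩; omega
    simp only [maxCountLoop, if_neg hc]
    rw [if_pos (by omega)]

theorem block_fold (bset : PySem.Set Int) (maxSum : Int) :
    ∀ (len : Nat) (lo S T : Int), 1 ≤ lo →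
    (∀ x : Int, lo ≤ x → x < lo + len → x ∉ bset) →
    (PySem.List.pyRange lo (lo + len) 1).foldl (stepF bset maxSum) (S, T)
      = (S + takeB lo (maxSum - T) 0 len, T + gsum lo (takeB lo (maxSum - T) 0 len)) := by
  intro len
  induction len with
  | zero =>
    intro lo S T hlo _
    have hnil : PySem.List.pyRange lo (lo + (0 : Nat)) 1 = [] :=
      PySem.List.pyRange_one_eq_nil (by omega)
    have h0 : takeB lo (maxSum - T) 0 (0 : Nat) = 0 := by rw [takeB]; simp
    rw [hnil, h0, gsum_zero]
    simp
  | succ len ih =>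
    intro lo S T hlo hban
    have hcons : PySem.List.pyRange lo (lo + ((len : Nat) + 1 : Nat)) 1
        = lo :: PySem.List.pyRange (lo + 1) ((lo + 1) + (len : Nat)) 1 := by
      rw [PySem.List.pyRange_one_cons (by push_cast; omega)]
      congr 1
      push_cast
      ring_nf
    rw [hcons, List.foldl_cons]
    have hnb : lo ∉ bset := hban lo (le_refl lo) (by push_cast; omega)
    have hrec := takeB_rec lo (maxSum - T) ((len : Nat) + 1 : Nat) hlo (by push_cast; omega)
    by_cases hfit : T + lo ≤ maxSum
    · have hstep : stepF bset maxSum (S, T) lo = (S + 1, T + lo) := by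
        simp only [stepF]; rw [if_pos ⟨hnb, hfit⟩]
      rw [hstep]
      rw [ih (lo + 1) (S + 1) (T + lo) (by omega)
        (fun x hx1 hx2 => hban x (by omega) (by push_cast at hx2 ⊢; omega))]
      have hKeq : takeB lo (maxSum - T) 0 ((len : Nat) + 1 : Nat)
          = 1 + takeB (lo + 1) (maxSum - (T + lo)) 0 (len : Nat) := by
        have e1 : maxSum - T - lo = maxSum - (T + lo) := by ring
        have e2 : ((len + 1 : Nat) : Int) - 1 = ((len : Nat) : Int) := by push_cast; ring
        rw [hrec, if_pos ⟨by push_cast; omega, by omega⟩, e1, e2]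
      have hcast : ((((len : Nat) + 1 : Nat)) : Int) = ((len : Nat) : Int) + 1 := by push_cast; ring
      rw [hcast] at hKeq ⊢
      rw [hKeq]
      simp only [Prod.mk.injEq]
      refine ⟨by omega, ?_⟩
      rw [add_comm 1 (takeB (lo + 1) (maxSum - (T + lo)) 0 ((len : Nat) : Int)), gsum_shift]
      ring
    · have hstep : stepF bset maxSum (S, T) lo = (S, T) := by
        simp only [stepF]; rw [if_neg (by rintro ⟨_, h2⟩; omega)]
      rw [hstep]
      rw [fold_stall bset maxSum _ S T (by
        intro x hx
        rw [PySem.List.mem_pyRange_one] at hx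
        omega)]
      have hK0 : takeB lo (maxSum - T) 0 ((len : Nat) + 1 : Nat) = 0 := by
        rw [hrec, if_neg (by rintro ⟨_, h2⟩; omega)]
      rw [hK0, gsum_zero]
      simp

theorem main_loop (bset : PySem.Set Int) (maxSum n : Int) :
    ∀ (bs : List Int) (prev S T : Int), 0 ≤ prev →
    bs.Pairwise (· < ·) →
    (∀ x ∈ bs, prev < x ∧ x ≤ n) →
    (∀ i : Int, prev < i → i ≤ n → (i ∈ bset ↔ i ∈ bs)) →
    segLoopB (bs ++ [n + 1]) prev S (maxSum - T)
      = ((PySem.List.pyRange (prev + 1) (n + 1) 1).foldl (stepF bset maxSum) (S, T)).1 := by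
  intro bs
  induction bs with
  | nil =>
    intro prev S T hprev _ _ hmem
    simp only [List.nil_append, segLoopB]
    by_cases hpn : prev + 1 ≤ n
    · have hblock := block_fold bset maxSum (n - prev).toNat (prev + 1) S T (by omega)
        (fun x hx1 hx2 hxb => by
          have h := (hmem x (by omega) (by omega)).1 hxb
          simp at h)
      rw [show (prev + 1) + (((n - prev).toNat : Nat) : Int) = n + 1 by omega] at hblock
      rw [hblock]
      rw [if_pos (show prev + 1 ≤ n + 1 - 1 by omega)]
      rw [show n + 1 - 1 - (prev + 1) + 1 = (((n - prev).toNat : Nat) : Int) by omega]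
      split_ifs with hsm
      · rfl
      · rfl
    · rw [if_neg (by omega)]
      rw [PySem.List.pyRange_one_eq_nil (by omega)]
      rfl
  | cons b rest ih =>
    intro prev S T hprev hpw helem hmem
    obtain ⟨hpb, hbn⟩ := helem b (by simp)
    have hbrest : ∀ y ∈ rest, b < y := (List.pairwise_cons.mp hpw).1
    have hpwrest := (List.pairwise_cons.mp hpw).2
    have hsplit : PySem.List.pyRange (prev + 1) (n + 1) 1
        = PySem.List.pyRange (prev + 1) b 1 ++ b :: PySem.List.pyRange (b + 1) (n + 1) 1 := by
      rw [PySem.List.pyRange_one_append (prev + 1) b (n + 1) (by omega) (by omega)]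
      congr 1
      exact PySem.List.pyRange_one_cons (by omega)
    rw [hsplit, List.foldl_append]
    have hblock := block_fold bset maxSum (b - prev - 1).toNat (prev + 1) S T (by omega)
      (fun x hx1 hx2 hxb => by
        have hx : x ∈ b :: rest := (hmem x (by omega) (by omega)).1 hxb
        rcases List.mem_cons.mp hx with h | h
        · omega
        · exact absurd (hbrest x h) (by omega))
    rw [show (prev + 1) + (((b - prev - 1).toNat : Nat) : Int) = b by omega] at hblock
    rw [hblock, List.foldl_cons]
    have hbmem : b ∈ bset := (hmem b (by omega) (by omega)).2 (by simp)
    set K := takeB (prev + 1) (maxSum - T) 0 (((b - prev - 1).toNat : Nat) : Int) with hKdef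
    have hstepb : stepF bset maxSum
        (S + K, T + gsum (prev + 1) K) b = (S + K, T + gsum (prev + 1) K) := by
      simp only [stepF]
      rw [if_neg (by rintro ⟨h1, _⟩; exact h1 hbmem)]
    rw [hstepb]
    have hmemrest : ∀ i : Int, b < i → i ≤ n → (i ∈ bset ↔ i ∈ rest) := by
      intro i h1 h2
      rw [hmem i (by omega) h2]
      simp only [List.mem_cons]
      constructor
      · intro h
        rcases h with h | h
        · omega
        · exact h
      · intro h
        exact Or.inr h
    have helemrest : ∀ x ∈ rest, b < x ∧ x ≤ n :=
      fun x hx => ⟨hbrest x hx, (helem x (by simp [hx])).2⟩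
    simp only [List.cons_append, segLoopB]
    by_cases hblk : prev + 1 ≤ b - 1
    · rw [if_pos hblk]
      have hKspec := takeB_spec (prev + 1) (maxSum - T) (b - prev - 1).toNat 0
        (((b - prev - 1).toNat : Nat) : Int) (by omega) (by omega)
      rw [show b - 1 - (prev + 1) + 1 = (((b - prev - 1).toNat : Nat) : Int) by omega]
      split_ifs with hsm
      · -- short block: A adds nothing afterwards
        have hstall := fold_stall bset maxSum (PySem.List.pyRange (b + 1) (n + 1) 1)
          (S + K) (T + gsum (prev + 1) K) (by
            intro x hx
            rw [PySem.List.mem_pyRange_one] at hx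
            have hnf := hKspec.2.2.2 (by omega)
            rw [← hKdef] at hnf
            have hst := gsum_step (prev + 1) K
            omega)
        rw [hstall]
      · -- full block: recurse
        have hKlen : K = b - prev - 1 := by omega
        have hbud : maxSum - T - (K * (prev + 1) + PySem.Int.floordiv (K * (K - 1)) 2)
            = maxSum - (T + gsum (prev + 1) K) := by
          unfold gsum; ring
        rw [hbud]
        exact ih b (S + K) (T + gsum (prev + 1) K) (by omega) hpwrest helemrest hmemrest
    · rw [if_neg hblk]
      have hb1 : b = prev + 1 := by omega
      have hK0 : K = 0 := by
        rw [hKdef, show (((b - prev - 1).toNat : Nat) : Int) = 0 by omega, takeB]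
        simp
      rw [hK0, gsum_zero, add_zero, add_zero]
      exact ih b S T (by omega) hpwrest helemrest hmemrest

-- ===== VERDICT (by name: the statement is the Claim_ definition above) =====
theorem maxCount_spec : Claim_equal_maxCount := by
  unfold Claim_equal_maxCount Spec_maxCount
  intro banned n maxSum _
  simp only [maxCount, maxCount_alt]
  set bset := PySem.Set.ofList banned with hbset
  set bs := PySem.List.sorted
    (PySem.Set.ofList (banned.filter (fun b => decide (1 ≤ b) && decide (b ≤ n))))
    (fun x => x) false with hbs
  have hmembs : ∀ x : Int, x ∈ bs ↔ (x ∈ banned ∧ 1 ≤ x ∧ x ≤ n) := by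
    intro x
    rw [hbs, PySem.List.mem_sorted, PySem.Set.mem_ofList, List.mem_filter]
    simp
  have hpw : bs.Pairwise (· < ·) := PySem.List.sorted_ofList_pairwise_lt _
  have hmain := main_loop bset maxSum n bs 0 0 0 le_rfl hpw
    (fun x hx => by
      have h := (hmembs x).1 hx
      exact ⟨by omega, h.2.2⟩)
    (fun i h1 h2 => by
      rw [hbset, PySem.Set.mem_ofList, hmembs i]
      constructor
      · intro h; exact ⟨h, by omega, h2⟩
      · intro h; exact h.1)
  rw [sub_zero, show (0 : Int) + 1 = 1 by ring] at hmain
  by_cases hms : 0 ≤ maxSum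
  · rw [loopA_eq_fold bset maxSum _ 0 0 hms, hmain]
  · have hA := loopA_stall bset maxSum (PySem.List.pyRange 1 (n + 1) 1) 0 0 (by omega)
      (fun x hx => by rw [PySem.List.mem_pyRange_one] at hx; omega)
    have hB := fold_stall bset maxSum (PySem.List.pyRange 1 (n + 1) 1) 0 0
      (fun x hx => by rw [PySem.List.mem_pyRange_one] at hx; omega)
    rw [hA, hmain, hB]
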